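-- pv_equiv track=rewrite | github.com/slamatik/codewars | 5 kyu/Double Cola.py | who_is_next
-- ===== SOURCE A (Python) =====
-- def who_is_next(names, r):
--     if r <= 5:
--         return names[r - 1]
--     start = 1
--     letter_count = 1
--     while start < r:
--         start += len(names) * letter_count
--         letter_count *= 2
--     letter_count //= 2
--     cnt = len(names)
--     if start == r:
--         return names[0]
--     while True:
--         start -= letter_count
--         cnt -= 1
--         if start == r:
--             return names[cnt]
--         elif start > r:
--             continue
--         else:
--             return names[cnt]
-- ===== SOURCE B (Python) =====
-- def who_is_next(names, r):
--     n = len(names)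
--     k = ((r - 1) // n + 1).bit_length() - 1
--     return names[(r - 1 - n * (2 ** k - 1)) // 2 ** k]
-- ===== Notes on version B (the rewrite author's own statement) =====
-- stated objective: simpler
-- what changed: Replaces A's doubling loop plus backwards step-down scan over the names with a closed form: bit_length of (r-1)//n + 1 gives the round, one integer division gives the name index.
-- outside the precondition, e.g. on who_is_next(['a', 'b'], 0): A returns 'b', B raises TypeError
import Mathlib
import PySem

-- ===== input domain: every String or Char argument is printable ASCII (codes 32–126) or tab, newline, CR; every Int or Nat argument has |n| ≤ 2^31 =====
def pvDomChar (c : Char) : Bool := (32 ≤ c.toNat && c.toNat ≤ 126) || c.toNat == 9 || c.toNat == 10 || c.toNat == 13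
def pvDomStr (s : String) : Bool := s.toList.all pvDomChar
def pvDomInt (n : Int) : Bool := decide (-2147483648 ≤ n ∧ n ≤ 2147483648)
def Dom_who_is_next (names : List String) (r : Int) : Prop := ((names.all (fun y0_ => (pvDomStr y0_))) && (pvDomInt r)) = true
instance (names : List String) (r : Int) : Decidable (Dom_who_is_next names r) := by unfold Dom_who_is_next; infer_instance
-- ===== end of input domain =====

-- B replaces A's doubling loop and step-down scan with a closed form (bit_length + one division); objective: simpler.


-- ===== PORT A =====
-- first while loop: start += len(names)*letter_count; letter_count *= 2
-- (the 'n * lc ≤ 0' test only makes the recursion total: Python diverges there, excluded by Pre_)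
def pvLoopA1 (n r : Int) (start lc : Int) : Int × Int :=
  if h : start < r then
    if h0 : n * lc ≤ 0 then (start, lc)
    else pvLoopA1 n r (start + n * lc) (lc * 2)
  else (start, lc)
termination_by (r - start).toNat
decreasing_by
  have : 1 ≤ n * lc := by omega
  omega

-- second while True loop (the 'lc ≤ 0' test only makes the recursion total: Python diverges there, excluded by Pre_)
def pvLoopA2 (names : List String) (r lc : Int) (start cnt : Int) : String :=
  if hlc : lc ≤ 0 then "" else
  if start - lc = r then (PySem.List.pyGet? names (cnt - 1)).getD ""
  else if h : start - lc > r then pvLoopA2 names r lc (start - lc) (cnt - 1)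
  else (PySem.List.pyGet? names (cnt - 1)).getD ""
termination_by (start - r).toNat
decreasing_by omega

def who_is_next (names : List String) (r : Int) : String :=
  if r ≤ 5 then (PySem.List.pyGet? names (r - 1)).getD ""
  else
    match pvLoopA1 (names.length : Int) r 1 1 with
    | (start, letter_count) =>
      if start = r then (PySem.List.pyGet? names 0).getD ""
      else pvLoopA2 names r (PySem.Int.floordiv letter_count 2) start (names.length : Int)

-- ===== PORT B =====
-- closed form: k = ((r-1)//n + 1).bit_length() - 1; names[(r - 1 - n*(2^k - 1)) // 2^k]
-- (the 'k < 0' test only makes the port total: Python raises TypeError there, excluded by Pre_)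
def pvIdxB (names : List String) (k r : Int) : String :=
  if k < 0 then "" else
  (PySem.List.pyGet? names
    (PySem.Int.floordiv (r - 1 - (names.length : Int) * (2 ^ k.toNat - 1)) (2 ^ k.toNat))).getD ""

def who_is_next_alt (names : List String) (r : Int) : String :=
  pvIdxB names ((PySem.Int.bitLength
    (PySem.Int.floordiv (r - 1) (names.length : Int) + 1) : Int) - 1) r


-- ===== PRECONDITION & SPEC =====
-- Pre_ excludes: empty names (A raises or diverges), r ≤ 5 with r > len(names) (A raises IndexError),
-- and r ≤ 0 (outside the natural serving domain; for -len(names) < r ≤ 0 A returns a value only by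
-- Python's negative-index wraparound, an artefact of names[r - 1]).
def Pre_who_is_next (names : List String) (r : Int) : Prop :=
  names ≠ [] ∧ 1 ≤ r ∧ (r ≤ 5 → r ≤ (names.length : Int))
instance (names : List String) (r : Int) : Decidable (Pre_who_is_next names r) := by
  unfold Pre_who_is_next; infer_instance

def pvWitness_who_is_next : List String × Int := (["a", "b"], 7)

def Spec_who_is_next (names : List String) (r : Int) (out : String) : Prop := out = who_is_next_alt names r
instance (names : List String) (r : Int) (out : String) : Decidable (Spec_who_is_next names r out) := by unfold Spec_who_is_next; infer_instance

-- ===== CLAIM (what is proved, stated in full; the proofs are below) =====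
def Claim_equal_who_is_next : Prop := ∀ (names : List String) (r : Int), Dom_who_is_next names r → Pre_who_is_next names r → Spec_who_is_next names r (who_is_next names r)

-- ===== LEMMAS AND PROOFS =====

-- the second loop returns names[cnt - ceil((start - r)/lc)] when it starts above r
lemma pvLoopA2_spec (names : List String) (r lc : Int) (hlc : 1 ≤ lc) :
    ∀ t : Nat, ∀ start cnt : Int, (start - r).toNat ≤ t → r < start →
      pvLoopA2 names r lc start cnt =
        (PySem.List.pyGet? names (cnt - PySem.Int.floordiv (start - r + lc - 1) lc)).getD "" := by
  intro t
  induction t with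
  | zero => intro start cnt hm h; omega
  | succ t ih =>
    intro start cnt hm h
    have hlc0 : (0:Int) < lc := by omega
    rw [pvLoopA2, dif_neg (by omega : ¬ lc ≤ 0)]
    by_cases h1 : start - lc = r
    · have hc : PySem.Int.floordiv (start - r + lc - 1) lc = 1 := by
        rw [PySem.Int.floordiv_eq_iff_of_pos hlc0]
        constructor <;> nlinarith
      rw [if_pos h1, hc]
    · rw [if_neg h1]
      by_cases h2 : start - lc > r
      · rw [dif_pos h2, ih (start - lc) (cnt - 1) (by omega) h2]
        have e : start - r + lc - 1 = (start - lc - r + lc - 1) + 1 * lc := by ring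
        have : PySem.Int.floordiv (start - r + lc - 1) lc =
            PySem.Int.floordiv (start - lc - r + lc - 1) lc + 1 := by
          rw [e, PySem.Int.floordiv_eq_ediv_of_pos hlc0, PySem.Int.floordiv_eq_ediv_of_pos hlc0,
            Int.add_mul_ediv_right _ _ (by omega : lc ≠ 0)]
        rw [this]
        ring_nf
      · have hc : PySem.Int.floordiv (start - r + lc - 1) lc = 1 := by
          rw [PySem.Int.floordiv_eq_iff_of_pos hlc0]
          constructor <;> nlinarith
        rw [dif_neg h2, hc]

-- the first loop, started at block K with all earlier blocks below r, stops at the first block M reaching r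
lemma pvLoopA1_spec (n r : Int) (hn : 1 ≤ n) :
    ∀ t : Nat, ∀ K : Nat, (r - (1 + n * (2 ^ K - 1))).toNat ≤ t →
      (∀ j : Nat, j < K → 1 + n * (2 ^ j - 1) < r) →
      ∃ M : Nat, r ≤ 1 + n * (2 ^ M - 1) ∧ (∀ j : Nat, j < M → 1 + n * (2 ^ j - 1) < r) ∧
        pvLoopA1 n r (1 + n * (2 ^ K - 1)) (2 ^ K) = (1 + n * (2 ^ M - 1), 2 ^ M) := by
  intro t
  induction t with
  | zero =>
    intro K hm hK
    have hpow : (1:Int) ≤ 2 ^ K := one_le_pow₀ (by omega)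
    have hge : ¬ (1 + n * (2 ^ K - 1) < r) := by omega
    refine ⟨K, by omega, hK, ?_⟩
    rw [pvLoopA1, dif_neg hge]
  | succ t ih =>
    intro K hm hK
    by_cases hlt : 1 + n * (2 ^ K - 1) < r
    · have hpow : (1:Int) ≤ 2 ^ K := one_le_pow₀ (by omega)
      have hpos : (1:Int) ≤ n * 2 ^ K := one_le_mul_of_one_le_of_one_le hn hpow
      have hstep : 1 + n * (2 ^ K - 1) + n * 2 ^ K = 1 + n * (2 ^ (K + 1) - 1) := by
        rw [pow_succ]; ring
      have hlc : (2:Int) ^ K * 2 = 2 ^ (K + 1) := by rw [pow_succ]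
      have hK' : ∀ j : Nat, j < K + 1 → 1 + n * (2 ^ j - 1) < r := by
        intro j hj
        rcases Nat.lt_succ_iff_lt_or_eq.mp hj with hj' | hj'
        · exact hK j hj'
        · subst hj'; exact hlt
      have hm' : (r - (1 + n * (2 ^ (K + 1) - 1))).toNat ≤ t := by
        have : 1 + n * (2 ^ K - 1) + 1 ≤ 1 + n * (2 ^ (K + 1) - 1) := by omega
        omega
      obtain ⟨M, h1, h2, h3⟩ := ih (K + 1) hm' hK'
      refine ⟨M, h1, h2, ?_⟩
      rw [pvLoopA1, dif_pos hlt, dif_neg (by omega : ¬ n * 2 ^ K ≤ 0), hstep, hlc, h3]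
    · have hpow : (1:Int) ≤ 2 ^ K := one_le_pow₀ (by omega)
      refine ⟨K, by omega, hK, ?_⟩
      rw [pvLoopA1, dif_neg hlt]

-- pin bit_length from two-power bounds
lemma pv_bitLength_pin (x : Int) (M : Nat) (hM : 1 ≤ M)
    (h1 : (2:Int) ^ (M - 1) ≤ x) (h2 : x < 2 ^ M) : PySem.Int.bitLength x = M := by
  have hx0 : (0:Int) < x := lt_of_lt_of_le (by positivity) h1
  have hxne : x ≠ 0 := by omega
  have e : ((x.natAbs : Int)) = x := Int.natAbs_of_nonneg hx0.le
  have hp1 : ((2 ^ (M - 1) : Nat) : Int) = 2 ^ (M - 1) := by push_cast; ring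
  have hp2 : ((2 ^ M : Nat) : Int) = 2 ^ M := by push_cast; ring
  have hn1 : 2 ^ (M - 1) ≤ x.natAbs := by omega
  have hn2 : x.natAbs < 2 ^ M := by omega
  have a1 := PySem.Int.two_pow_bitLength_le x hxne
  have a2 := PySem.Int.lt_two_pow_bitLength x
  set B := PySem.Int.bitLength x with hB
  have l1 : B - 1 < M := by
    have : (2:Nat) ^ (B - 1) < 2 ^ M := lt_of_le_of_lt a1 hn2
    exact (Nat.pow_lt_pow_iff_right (by norm_num)).mp this
  have l2 : M - 1 < B := by
    have : (2:Nat) ^ (M - 1) < 2 ^ B := lt_of_le_of_lt hn1 a2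
    exact (Nat.pow_lt_pow_iff_right (by norm_num)).mp this
  omega

theorem who_is_next_spec : Claim_equal_who_is_next := by
  intro names r _ hpre
  obtain ⟨hne, hr1, hr5⟩ := hpre
  unfold Spec_who_is_next who_is_next who_is_next_alt
  have hn : (1:Int) ≤ (names.length : Int) := by
    have : names.length ≠ 0 := by simpa using hne
    omega
  set n : Int := (names.length : Int) with hdefn
  by_cases h5 : r ≤ 5
  · -- small case: both are names[r-1]
    have hq : PySem.Int.floordiv (r - 1) n = 0 := by
      rw [PySem.Int.floordiv_eq_iff_of_pos (by omega)]
      have := hr5 h5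
      constructor <;> omega
    have hbl : PySem.Int.bitLength (0 + 1) = 1 := by decide
    rw [if_pos h5, hq, hbl, pvIdxB, if_neg (by norm_num)]
    norm_num [PySem.Int.floordiv_eq_ediv_of_pos]
  · -- large case: r ≥ 6
    rw [if_neg h5]
    have hr6 : 6 ≤ r := by omega
    have hstart0 : (1:Int) + n * (2 ^ 0 - 1) = 1 := by norm_num
    obtain ⟨M, hM, hKlt, hloop⟩ := pvLoopA1_spec n r hn (r - 1).toNat 0
      (by simp [hstart0]) (by omega)
    rw [hstart0] at hloop
    norm_num at hloop
    have hM1 : 1 ≤ M := by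
      by_contra h
      have : M = 0 := by omega
      subst this; simp at hM; omega
    obtain ⟨m, rfl⟩ : ∃ m, M = m + 1 := ⟨M - 1, by omega⟩
    have hprev : 1 + n * (2 ^ m - 1) < r := hKlt m (by omega)
    have hbpos : (0:Int) < 2 ^ m := by positivity
    have e2 : (2:Int) ^ (m + 1) = 2 ^ m * 2 := by rw [pow_succ]
    have hlc2 : PySem.Int.floordiv ((2:Int) ^ (m + 1)) 2 = 2 ^ m := by
      rw [PySem.Int.floordiv_eq_ediv_of_pos (by norm_num), pow_succ,
        Int.mul_ediv_cancel _ (by norm_num)]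
    rw [hloop]
    simp only [hlc2]
    by_cases hb : (1:Int) + n * (2 ^ (m + 1) - 1) = r
    · -- boundary: A returns names[0]
      rw [if_pos hb]
      have hq : PySem.Int.floordiv (r - 1) n = 2 ^ (m + 1) - 1 := by
        rw [PySem.Int.floordiv_eq_iff_of_pos (by omega)]
        constructor <;> nlinarith
      have hbl : PySem.Int.bitLength (2 ^ (m + 1) - 1 + 1) = m + 2 := by
        apply pv_bitLength_pin _ (m + 2) (by omega)
        · have e : (m + 2) - 1 = m + 1 := by omega
          rw [e]; omega
        · have e3 : (2:Int) ^ (m + 2) = 2 ^ (m + 1) * 2 := by rw [pow_succ]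
          have : (0:Int) < 2 ^ (m + 1) := by positivity
          omega
      rw [hq, hbl, pvIdxB, if_neg (by push_cast; omega)]
      have htn : (((m + 2 : Nat) : Int) - 1).toNat = m + 1 := by push_cast; omega
      rw [htn]
      have hz : r - 1 - n * (2 ^ (m + 1) - 1) = 0 := by omega
      rw [hz]
      have : PySem.Int.floordiv 0 (2 ^ (m + 1)) = 0 := by
        rw [PySem.Int.floordiv_eq_ediv_of_pos (by positivity)]
        exact Int.zero_ediv _
      rw [this]
    · -- interior: A walks down, B divides
      rw [if_neg hb]
      have hrlt : r < 1 + n * (2 ^ (m + 1) - 1) := by omega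
      rw [pvLoopA2_spec names r (2 ^ m) (by omega)
        ((1 + n * (2 ^ (m + 1) - 1) - r).toNat) (1 + n * (2 ^ (m + 1) - 1)) n
        (le_refl _) (by omega)]
      have hq1 : 2 ^ m - 1 ≤ PySem.Int.floordiv (r - 1) n := by
        rw [PySem.Int.le_floordiv_iff_mul_le (by omega)]; nlinarith
      have hq2 : PySem.Int.floordiv (r - 1) n < 2 ^ (m + 1) - 1 := by
        rw [PySem.Int.floordiv_lt_iff_lt_mul (by omega)]; nlinarith
      have hbl : PySem.Int.bitLength (PySem.Int.floordiv (r - 1) n + 1) = m + 1 := by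
        apply pv_bitLength_pin _ (m + 1) (by omega)
        · have e : (m + 1) - 1 = m := by omega
          rw [e]; omega
        · omega
      rw [hbl, pvIdxB, if_neg (by push_cast; omega)]
      have htn : (((m + 1 : Nat) : Int) - 1).toNat = m := by push_cast; omega
      rw [htn]
      -- arithmetic core: n - ceil((start - r)/2^m) = (r - 1 - n*(2^m - 1)) // 2^m
      set b : Int := 2 ^ m with hbdef
      set s : Int := r - 1 - n * (b - 1) with hsdef
      have hs1 : 1 ≤ s := by omega
      have hs2 : s < n * b := by nlinarith
      set d : Int := PySem.Int.floordiv s b with hddef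
      have hd := (PySem.Int.floordiv_eq_iff_of_pos (b := b) (a := s) (q := d) hbpos).mp rfl
      have hceil : PySem.Int.floordiv (1 + n * (2 ^ (m + 1) - 1) - r + b - 1) b = n - d := by
        rw [PySem.Int.floordiv_eq_iff_of_pos hbpos]
        constructor <;> nlinarith
      rw [hceil]
      have e : n - (n - d) = d := by ring
      rw [e]
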